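-- pv_equiv track=rewrite | github.com/AdamAndrei/algorithms-and-programming-course | lab 3/business/UI.py | max_per_location
-- ===== SOURCE A (Python) =====
-- def get_price(object):
--     """
--     Description: get the price of an object
--     :param object: list
--     :return: price of the object
--     """
--     return object[3]
--
-- def get_location(object):
--     """
--     Description: get the location of an object
--     :param object: list
--     :return: location of the object
--     """
--     return object[4]
--
-- def max_per_location(list_of_objects):
--     """
--     Description: Function returns a dictionary that contains the maximum price per location
--     :param list_of_objects: list
--     :return: dictionary
--     """
--     max_price_by_location = {}
--     for object_one in list_of_objects:
--         location = get_location(object_one)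
--         current_price = get_price(object_one)
--         if location not in max_price_by_location:
--             max_price_by_location[location] = get_price(object_one)
--
--         previous_price = max_price_by_location[location]
--         if previous_price < current_price:
--             max_price_by_location[location] = current_price
--
--     return max_price_by_location
-- ===== SOURCE B (Python) =====
-- def max_per_location(list_of_objects):
--     """
--     Group-then-reduce: first collect every location's prices in order,
--     then take the max of each group.  First-occurrence key order is kept.
--     """
--     prices_by_location = {}
--     for object_one in list_of_objects:
--         location = object_one[4]
--         price = object_one[3]
--         if location in prices_by_location:
--             prices_by_location[location] = prices_by_location[location] + [price]
--         else:
--             prices_by_location[location] = [price]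
--     return {location: max(prices) for location, prices in prices_by_location.items()}
-- ===== Notes on version B (the rewrite author's own statement) =====
-- stated objective: alternative
-- what changed: Replaces A's inline running-max update with a two-phase group-then-reduce: one pass collects each location's prices into a grouping dict, a second pass maps max() over the groups, preserving first-occurrence key order.
import Mathlib
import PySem

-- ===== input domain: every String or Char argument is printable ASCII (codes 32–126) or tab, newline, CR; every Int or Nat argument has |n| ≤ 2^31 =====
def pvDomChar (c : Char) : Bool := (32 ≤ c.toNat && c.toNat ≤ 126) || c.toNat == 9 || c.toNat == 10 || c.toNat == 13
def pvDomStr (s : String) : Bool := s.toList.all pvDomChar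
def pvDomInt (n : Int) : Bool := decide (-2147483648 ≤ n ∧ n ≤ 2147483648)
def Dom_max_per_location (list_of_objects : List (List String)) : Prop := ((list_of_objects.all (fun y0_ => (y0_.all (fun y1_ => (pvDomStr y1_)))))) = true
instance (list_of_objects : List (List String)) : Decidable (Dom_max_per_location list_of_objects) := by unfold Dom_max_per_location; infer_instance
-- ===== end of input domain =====

-- B replaces A's inline running-max with a group-then-reduce decomposition (grouping dict of
-- price lists, then max per group); same O(n) cost, objective: alternative decomposition.

-- ===== PORT A =====
-- object[3] / object[4]: pyGet? returns none on IndexError; Pre_ guarantees length ≥ 5,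
-- so the .getD "" default is never reached on admitted inputs.
def get_price (object : List String) : String := (PySem.List.pyGet? object 3).getD ""

def get_location (object : List String) : String := (PySem.List.pyGet? object 4).getD ""

def max_per_location (list_of_objects : List (List String)) : List (String × String) :=
  (list_of_objects.foldl (fun max_price_by_location object_one =>
      let location := get_location object_one
      let current_price := get_price object_one
      let max_price_by_location :=
        if max_price_by_location.contains location = false then
          max_price_by_location.insert location (get_price object_one)
        else max_price_by_location
      let previous_price := max_price_by_location.getD location ""
      if previous_price < current_price then
        max_price_by_location.insert location current_price
      else max_price_by_location)
    PySem.Dict.empty).items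

-- ===== PORT B =====
def max_per_location_alt (list_of_objects : List (List String)) : List (String × String) :=
  let prices_by_location := list_of_objects.foldl (fun prices_by_location object_one =>
      let location := (PySem.List.pyGet? object_one 4).getD ""
      let price := (PySem.List.pyGet? object_one 3).getD ""
      if prices_by_location.contains location then
        prices_by_location.insert location (prices_by_location.getD location [] ++ [price])
      else prices_by_location.insert location [price])
    PySem.Dict.empty
  prices_by_location.items.map (fun p => (p.1, (PySem.List.max? p.2 (fun x => x)).getD ""))

-- ===== PRECONDITION & SPEC =====
-- Pre_ excludes exactly the inputs on which Python A raises IndexError: an object shorter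
-- than 5 elements has no object[4] (or object[3]).
def Pre_max_per_location (list_of_objects : List (List String)) : Prop :=
  ∀ o ∈ list_of_objects, 5 ≤ o.length
instance (list_of_objects : List (List String)) : Decidable (Pre_max_per_location list_of_objects) := by unfold Pre_max_per_location; infer_instance

def pvWitness_max_per_location : List (List String) :=
  [["a", "b", "c", "10", "X"], ["d", "e", "f", "9", "X"]]

def Spec_max_per_location (list_of_objects : List (List String)) (out : List (String × String)) : Prop := out = max_per_location_alt list_of_objects
instance (list_of_objects : List (List String)) (out : List (String × String)) : Decidable (Spec_max_per_location list_of_objects out) := by unfold Spec_max_per_location; infer_instance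

-- ===== CLAIM (what is proved, stated in full; the proofs are below) =====
def Claim_equal_max_per_location : Prop := ∀ (list_of_objects : List (List String)), Dom_max_per_location list_of_objects → Pre_max_per_location list_of_objects → Spec_max_per_location list_of_objects (max_per_location list_of_objects)

-- ===== LEMMAS AND PROOFS =====

-- max of a nonempty list, as B computes it
def pvMax (l : List String) : String := (PySem.List.max? l (fun x => x)).getD ""

lemma pvMax_singleton (v : String) : pvMax [v] = v := by
  simp [pvMax, PySem.List.max?_id_cons]

lemma pvMax_append (ps : List String) (v : String) (h : ps ≠ []) :
    pvMax (ps ++ [v]) = if pvMax ps < v then v else pvMax ps := by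
  rcases ps with _ | ⟨x, t⟩
  · exact absurd rfl h
  · simp only [List.cons_append, pvMax, PySem.List.max?_id_cons, List.foldl_append,
      List.foldl_cons, List.foldl_nil, Option.getD_some]
    by_cases hlt : t.foldl max x < v
    · simp [hlt, max_eq_right hlt.le]
    · simp [hlt, max_eq_left (not_lt.mp hlt)]

-- the loop invariant: A's dict is B's grouping dict with every group reduced by pvMax
lemma pv_loop (xs : List (List String)) :
    ∀ (d : PySem.Dict String String) (g : PySem.Dict String (List String)),
    g.keys.Nodup →
    d.items = g.items.map (fun p => (p.1, pvMax p.2)) →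
    (∀ p ∈ g.items, p.2 ≠ []) →
    (xs.foldl (fun max_price_by_location object_one =>
      let location := get_location object_one
      let current_price := get_price object_one
      let max_price_by_location :=
        if max_price_by_location.contains location = false then
          max_price_by_location.insert location (get_price object_one)
        else max_price_by_location
      let previous_price := max_price_by_location.getD location ""
      if previous_price < current_price then
        max_price_by_location.insert location current_price
      else max_price_by_location) d).items
    = ((xs.foldl (fun prices_by_location object_one =>
      let location := (PySem.List.pyGet? object_one 4).getD ""
      let price := (PySem.List.pyGet? object_one 3).getD ""
      if prices_by_location.contains location then
        prices_by_location.insert location (prices_by_location.getD location [] ++ [price])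
      else prices_by_location.insert location [price]) g).items).map
        (fun p => (p.1, pvMax p.2)) := by
  induction xs with
  | nil => intro d g _ hitems _; simpa using hitems
  | cons o xs ih =>
    intro d g hnd hitems hne
    simp only [List.foldl_cons]
    set k := (PySem.List.pyGet? o 4).getD "" with hk
    set v := (PySem.List.pyGet? o 3).getD "" with hv
    have hkeys : d.keys = g.keys := by
      simp only [PySem.Dict.keys, hitems, List.map_map]; rfl
    have hcont : d.contains k = g.contains k := by
      simp [PySem.Dict.contains_eq_decide_mem_keys, hkeys]
    have hdnd : d.keys.Nodup := by rw [hkeys]; exact hnd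
    by_cases hc : g.contains k = true
    · -- existing location
      have hdc : d.contains k = true := by rw [hcont]; exact hc
      have hmemk : k ∈ g.keys := by
        simpa [PySem.Dict.contains_eq_decide_mem_keys] using hc
      obtain ⟨p0, hp0mem, hp01⟩ : ∃ p ∈ g.items, p.1 = k := by
        simpa [PySem.Dict.keys] using hmemk
      obtain ⟨ps, hp0⟩ : ∃ ps, p0 = (k, ps) := ⟨p0.2, by rw [← hp01]⟩
      subst hp0
      have hgget : g.getD k [] = ps := PySem.Dict.getD_of_mem_items _ hp0mem hnd []
      have hpsne : ps ≠ [] := hne _ hp0mem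
      have hdmem : (k, pvMax ps) ∈ d.items := by
        rw [hitems]; exact List.mem_map_of_mem hp0mem
      have hdget : d.getD k "" = pvMax ps := PySem.Dict.getD_of_mem_items _ hdmem hdnd ""
      have hup : ∀ p ∈ g.items, p.1 = k → p.2 = ps := by
        intro p hp hpk
        have h1 : g.get? p.1 = some p.2 := PySem.Dict.get?_of_mem_items _ (by simpa using hp) hnd
        have h2 : g.get? k = some ps := PySem.Dict.get?_of_mem_items _ hp0mem hnd
        rw [hpk, h2] at h1; exact (Option.some_inj.mp h1).symm
      simp only [get_location, get_price, ← hk, ← hv, hdc, Bool.true_eq_false,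
        if_false, hc, if_true, hdget, hgget]
      apply ih
      · exact PySem.Dict.nodup_keys_insert _ _ _ hnd
      · -- items invariant after the step
        by_cases hlt : pvMax ps < v
        · rw [if_pos hlt, PySem.Dict.items_insert_of_contains _ _ hdc,
            PySem.Dict.items_insert_of_contains _ _ hc, hitems,
            List.map_map, List.map_map]
          refine List.map_congr_left ?_
          intro p hp
          by_cases hpk : p.1 = k
          · simp [Function.comp, hpk, pvMax_append ps v hpsne, hlt]
          · simp [Function.comp, hpk]
        · rw [if_neg hlt, PySem.Dict.items_insert_of_contains _ _ hc, hitems,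
            List.map_map]
          refine List.map_congr_left ?_
          intro p hp
          by_cases hpk : p.1 = k
          · simp [Function.comp, hpk, hup p hp hpk, pvMax_append ps v hpsne, hlt]
          · simp [Function.comp, hpk]
      · intro p hp
        rcases (PySem.Dict.mem_items_insert _ _ _ _).mp hp with h | ⟨h, _⟩
        · subst h; simp
        · exact hne _ h
    · -- fresh location
      have hc' : g.contains k = false := by simpa using hc
      have hdc : d.contains k = false := by rw [hcont, hc']
      simp only [get_location, get_price, ← hk, ← hv, hdc, if_pos, hc',
        Bool.false_eq_true, if_false, PySem.Dict.getD_insert_self, lt_irrefl]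
      apply ih
      · exact PySem.Dict.nodup_keys_insert _ _ _ hnd
      · rw [PySem.Dict.items_insert_of_not_contains _ _ hdc,
          PySem.Dict.items_insert_of_not_contains _ _ hc', hitems, List.map_append]
        simp [pvMax_singleton]
      · intro p hp
        rcases (PySem.Dict.mem_items_insert _ _ _ _).mp hp with h | ⟨h, _⟩
        · subst h; simp
        · exact hne _ h

-- ===== VERDICT (by name: the statement is the Claim_ definition above) =====
theorem max_per_location_spec : Claim_equal_max_per_location := by
  intro xs _ _
  unfold Spec_max_per_location max_per_location max_per_location_alt
  exact pv_loop xs PySem.Dict.empty PySem.Dict.empty (by simp [PySem.Dict.keys_empty])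
    (by simp [PySem.Dict.empty]) (by simp [PySem.Dict.empty])
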